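-- pv_equiv track=rewrite | github.com/andrew-kudrenko/university-labs | task_23_01_21__0.py | take_around
-- ===== SOURCE A (Python) =====
-- def take_around(iterable):
--     min_value = max_value = None
--     max_idx = min_idx = 0
--
--     for idx, item in enumerate(iterable):
--         if (min_value is None) or (item < min_value):
--             min_value = item
--             min_idx = idx
--
--         if (max_value is None) or (item > max_value):
--             max_value = item
--             max_idx = idx
--
--     if min_idx > max_idx:
--         return []
--
--     taken = []
--
--     for idx, item in enumerate(iterable):
--         if not min_idx <= idx <= max_idx:
--             taken.append(item)
--
--     return taken
-- ===== SOURCE B (Python) =====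
-- def take_around(iterable):
--     # One-pass algorithm: maintain a three-segment decomposition pre | inside | post
--     # of the elements seen so far, where `inside` spans from the earlier to the
--     # later of (first min occurrence, first max occurrence); no indices and no
--     # second pass are needed.  `bad` records that the first max precedes the
--     # first min (then A returns []).  Answer is pre + post.
--     pre, inside, post = [], [], []
--     mn = mx = None
--     bad = False
--     for x in iterable:
--         if mn is None:
--             mn = mx = x
--             inside = [x]
--         elif x < mn:
--             mn = x
--             if not bad:
--                 pre = pre + inside[:-1]
--                 inside = inside[-1:]
--                 bad = True
--             inside = inside + post + [x]
--             post = []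
--         elif x > mx:
--             mx = x
--             if bad:
--                 pre = pre + inside[:-1]
--                 inside = inside[-1:]
--                 bad = False
--             inside = inside + post + [x]
--             post = []
--         else:
--             post.append(x)
--     return [] if bad else pre + post
-- ===== Notes on version B (the rewrite author's own statement) =====
-- stated objective: alternative
-- what changed: Replaces A's two passes (one tracking min/max indices, then an index-filter pass appending elements outside [min_idx,max_idx]) with a single pass that keeps no indices at all: it maintains a three-segment decomposition pre|inside|post of the elements seen so far (inside spanning from the earlier to the later of the first min/max occurrences, a flag recording which comes first) and returns pre + post directly.
import Mathlib
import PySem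

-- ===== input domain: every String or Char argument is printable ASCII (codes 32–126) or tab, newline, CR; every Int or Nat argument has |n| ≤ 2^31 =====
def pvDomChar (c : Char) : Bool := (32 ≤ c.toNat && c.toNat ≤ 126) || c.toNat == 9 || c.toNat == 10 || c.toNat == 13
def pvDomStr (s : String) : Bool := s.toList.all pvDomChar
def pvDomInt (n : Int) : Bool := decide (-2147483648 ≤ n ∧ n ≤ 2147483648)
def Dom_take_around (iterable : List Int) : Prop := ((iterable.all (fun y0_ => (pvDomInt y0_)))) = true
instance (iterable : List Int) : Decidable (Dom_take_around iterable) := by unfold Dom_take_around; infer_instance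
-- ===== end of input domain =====

-- B replaces A's two passes (index tracking then index filtering) by a single pass that
-- maintains a three-segment decomposition pre|inside|post of the elements seen so far
-- and returns pre ++ post directly (alternative decomposition; return value only).

-- ===== PORT A =====
-- first loop of A: one pass updating (min_value, min_idx, max_value, max_idx), idx carried explicitly
def takeAroundLoop1 : List Int → Nat → Option Int → Nat → Option Int → Nat → (Option Int × Nat) × (Option Int × Nat)
  | [], _, minv, mini, maxv, maxi => ((minv, mini), (maxv, maxi))
  | item :: rest, idx, minv, mini, maxv, maxi =>
    let s1 : Option Int × Nat :=
      match minv with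
      | none => (some item, idx)
      | some v => if item < v then (some item, idx) else (some v, mini)
    let s2 : Option Int × Nat :=
      match maxv with
      | none => (some item, idx)
      | some v => if item > v then (some item, idx) else (some v, maxi)
    takeAroundLoop1 rest (idx + 1) s1.1 s1.2 s2.1 s2.2

-- second loop of A: append items whose index is outside [min_idx, max_idx]
def takeAroundLoop2 : List Int → Nat → Nat → Nat → List Int → List Int
  | [], _, _, _, acc => acc
  | item :: rest, idx, mini, maxi, acc =>
    takeAroundLoop2 rest (idx + 1) mini maxi
      (if ¬(mini ≤ idx ∧ idx ≤ maxi) then acc ++ [item] else acc)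

def take_around (iterable : List Int) : List Int :=
  let st := takeAroundLoop1 iterable 0 none 0 none 0
  let mini := st.1.2
  let maxi := st.2.2
  if mini > maxi then [] else takeAroundLoop2 iterable 0 mini maxi []

-- ===== PORT B =====
-- B's single loop; state: pre, inside, post, (mn, mx) (none before the first element),
-- bad = "first max precedes first min"; inside[:-1] and inside[-1:] are PySem slices
def altLoop : List Int → List Int → List Int → List Int → Option (Int × Int) → Bool → List Int × List Int × List Int × Option (Int × Int) × Bool
  | [], pre, ins, post, mm, bad => (pre, ins, post, mm, bad)
  | x :: rest, pre, ins, post, mm, bad =>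
    match mm with
    | none => altLoop rest pre [x] post (some (x, x)) bad
    | some (mn, mx) =>
      if x < mn then
        let pre' := if bad then pre else pre ++ PySem.List.slice ins none (some (-1))
        let ins1 := if bad then ins else PySem.List.slice ins (some (-1)) none
        altLoop rest pre' (ins1 ++ post ++ [x]) [] (some (x, mx)) true
      else if x > mx then
        let pre' := if bad then pre ++ PySem.List.slice ins none (some (-1)) else pre
        let ins1 := if bad then PySem.List.slice ins (some (-1)) none else ins
        altLoop rest pre' (ins1 ++ post ++ [x]) [] (some (mn, x)) false
      else
        altLoop rest pre ins (post ++ [x]) (some (mn, mx)) bad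

def take_around_alt (iterable : List Int) : List Int :=
  let st := altLoop iterable [] [] [] none false
  if st.2.2.2.2 then [] else st.1 ++ st.2.2.1

-- ===== PRECONDITION & SPEC =====
def Spec_take_around (iterable : List Int) (out : List Int) : Prop := out = take_around_alt iterable
instance (iterable : List Int) (out : List Int) : Decidable (Spec_take_around iterable out) := by unfold Spec_take_around; infer_instance

-- ===== CLAIM (what is proved, stated in full; the proofs are below) =====
def Claim_equal_take_around : Prop := ∀ (iterable : List Int), Dom_take_around iterable → Spec_take_around iterable (take_around iterable)

-- ===== LEMMAS AND PROOFS =====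

-- spec helper: (minimum value, index of its first occurrence), none on []
def fmin : List Int → Option (Int × Nat)
  | [] => none
  | x :: t =>
    match fmin t with
    | none => some (x, 0)
    | some (m, j) => if m < x then some (m, j + 1) else some (x, 0)

-- spec helper: (maximum value, index of its first occurrence), none on []
def fmax : List Int → Option (Int × Nat)
  | [] => none
  | x :: t =>
    match fmax t with
    | none => some (x, 0)
    | some (m, j) => if x < m then some (m, j + 1) else some (x, 0)

lemma fmin_cons_some (x : Int) (t : List Int) : ∃ m i, fmin (x :: t) = some (m, i) := by
  simp only [fmin]
  rcases fmin t with _ | ⟨m, j⟩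
  · exact ⟨x, 0, rfl⟩
  · dsimp only
    split
    · exact ⟨m, j + 1, rfl⟩
    · exact ⟨x, 0, rfl⟩

lemma fmax_cons_some (x : Int) (t : List Int) : ∃ m i, fmax (x :: t) = some (m, i) := by
  simp only [fmax]
  rcases fmax t with _ | ⟨m, j⟩
  · exact ⟨x, 0, rfl⟩
  · dsimp only
    split
    · exact ⟨m, j + 1, rfl⟩
    · exact ⟨x, 0, rfl⟩

lemma loop1_some (xs : List Int) : ∀ (k : Nat) (v : Int) (i : Nat) (w : Int) (j : Nat),
    takeAroundLoop1 xs k (some v) i (some w) j =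
      ((match fmin xs with
        | none => (some v, i)
        | some (m, p) => if m < v then (some m, k + p) else (some v, i)),
       (match fmax xs with
        | none => (some w, j)
        | some (m, p) => if w < m then (some m, k + p) else (some w, j))) := by
  induction xs with
  | nil => intro k v i w j; simp [takeAroundLoop1, fmin, fmax]
  | cons x t ih =>
    intro k v i w j
    have lhs_step : takeAroundLoop1 (x :: t) k (some v) i (some w) j =
        takeAroundLoop1 t (k + 1)
          (if x < v then some x else some v) (if x < v then k else i)
          (if w < x then some x else some w) (if w < x then k else j) := by
      simp only [takeAroundLoop1]
      split_ifs <;> rfl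
    rw [lhs_step]
    by_cases hxv : x < v <;> by_cases hwx : w < x <;>
      simp only [if_pos, if_neg, hxv, hwx, not_false_iff] <;>
      rw [ih] <;>
      clear ih lhs_step <;>
      simp only [fmin, fmax] <;>
      rcases hmt : fmin t with _ | ⟨m, p⟩ <;>
      rcases hMt : fmax t with _ | ⟨M, q⟩ <;>
      dsimp only <;>
      split_ifs <;>
      (try dsimp only) <;>
      (try split_ifs) <;>
      simp only [Prod.ext_iff, Option.some.injEq, true_and, and_true] <;>
      first | omega | (exfalso; omega) | rfl

lemma loop1_cons (x : Int) (t : List Int) :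
    takeAroundLoop1 (x :: t) 0 none 0 none 0 =
      ((match fmin (x :: t) with
        | none => (none, 0)
        | some (m, p) => (some m, p)),
       (match fmax (x :: t) with
        | none => (none, 0)
        | some (m, p) => (some m, p))) := by
  have h0 : takeAroundLoop1 (x :: t) 0 none 0 none 0 = takeAroundLoop1 t 1 (some x) 0 (some x) 0 := rfl
  rw [h0, loop1_some]
  simp only [fmin, fmax]
  rcases hmt : fmin t with _ | ⟨m, p⟩ <;>
    rcases hMt : fmax t with _ | ⟨M, q⟩ <;>
    dsimp only <;>
    split_ifs <;>
    (try dsimp only) <;>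
    (try split_ifs) <;>
    simp only [Prod.ext_iff, Option.some.injEq, true_and, and_true] <;>
    first | omega | (exfalso; omega) | rfl

lemma loop2_acc (xs : List Int) : ∀ (k i j : Nat) (acc : List Int),
    takeAroundLoop2 xs k i j acc = acc ++ takeAroundLoop2 xs k i j [] := by
  induction xs with
  | nil => intro k i j acc; simp [takeAroundLoop2]
  | cons x t ih =>
    intro k i j acc
    simp only [takeAroundLoop2]
    split_ifs with h
    · rw [ih]
    · rw [ih, ih (k + 1) i j ([] ++ [x])]
      simp

lemma loop2_high (xs : List Int) : ∀ (k i j : Nat), i < k →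
    takeAroundLoop2 xs k i j [] = xs.drop (j + 1 - k) := by
  induction xs with
  | nil => intro k i j _; simp [takeAroundLoop2]
  | cons x t ih =>
    intro k i j hik
    simp only [takeAroundLoop2]
    split_ifs with h
    · rw [ih (k + 1) i j (by omega)]
      have hs : j + 1 - k = (j - k) + 1 := by omega
      have ht : j + 1 - (k + 1) = j - k := by omega
      rw [hs, ht, List.drop_succ_cons]
    · rw [loop2_acc, ih (k + 1) i j (by omega)]
      have h1 : j + 1 - k = 0 := by omega
      have h2 : j + 1 - (k + 1) = 0 := by omega
      simp [h1, h2]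

lemma loop2_low (xs : List Int) : ∀ (k i j : Nat), k ≤ i → i ≤ j →
    takeAroundLoop2 xs k i j [] = xs.take (i - k) ++ xs.drop (j + 1 - k) := by
  induction xs with
  | nil => intro k i j _ _; simp [takeAroundLoop2]
  | cons x t ih =>
    intro k i j hki hij
    simp only [takeAroundLoop2]
    split_ifs with h
    · rw [loop2_high t (k + 1) i j (by omega)]
      have h1 : i - k = 0 := by omega
      have h2 : j + 1 - k = (j + 1 - (k + 1)) + 1 := by omega
      rw [h1, h2]
      simp
    · rw [loop2_acc, ih (k + 1) i j (by omega) hij]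
      have h1 : i - k = (i - (k + 1)) + 1 := by omega
      have h2 : j + 1 - k = (j + 1 - (k + 1)) + 1 := by omega
      rw [h1, h2]
      simp

-- ===== B-side lemmas =====

lemma fmin_lt_length (xs : List Int) : ∀ (m : Int) (i : Nat), fmin xs = some (m, i) → i < xs.length := by
  induction xs with
  | nil => intro m i h; simp [fmin] at h
  | cons x t ih =>
    intro m i h
    simp only [fmin] at h
    rcases hmt : fmin t with _ | ⟨m', j⟩ <;> rw [hmt] at h
    · simp at h; simp only [List.length_cons]; omega
    · dsimp only at h
      split_ifs at h with h1 <;> simp at h <;> obtain ⟨rfl, rfl⟩ := h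
      · have := ih m' j hmt; simp; omega
      · simp

lemma fmax_lt_length (xs : List Int) : ∀ (m : Int) (i : Nat), fmax xs = some (m, i) → i < xs.length := by
  induction xs with
  | nil => intro m i h; simp [fmax] at h
  | cons x t ih =>
    intro m i h
    simp only [fmax] at h
    rcases hmt : fmax t with _ | ⟨m', j⟩ <;> rw [hmt] at h
    · simp at h; simp only [List.length_cons]; omega
    · dsimp only at h
      split_ifs at h with h1 <;> simp at h <;> obtain ⟨rfl, rfl⟩ := h
      · have := ih m' j hmt; simp; omega
      · simp

lemma fmin_le_fmax (xs : List Int) : ∀ (m M : Int) (i j : Nat), fmin xs = some (m, i) → fmax xs = some (M, j) → m ≤ M := by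
  induction xs with
  | nil => intro m M i j h _; simp [fmin] at h
  | cons x t ih =>
    intro m M i j h1 h2
    simp only [fmin] at h1
    simp only [fmax] at h2
    rcases hmt : fmin t with _ | ⟨m', p⟩ <;> rw [hmt] at h1 <;>
      rcases hMt : fmax t with _ | ⟨M', q⟩ <;> rw [hMt] at h2
    · simp at h1 h2; omega
    · -- fmin t = none but fmax t = some: impossible (both are none exactly on [])
      have ht : t = [] := by
        cases t with
        | nil => rfl
        | cons z t' => obtain ⟨a, b, hc⟩ := fmin_cons_some z t'; rw [hc] at hmt; cases hmt
      subst ht; simp [fmax] at hMt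
    · -- fmin t = some but fmax t = none: impossible
      have ht : t = [] := by
        cases t with
        | nil => rfl
        | cons z t' => obtain ⟨a, b, hc⟩ := fmax_cons_some z t'; rw [hc] at hMt; cases hMt
      subst ht; simp [fmin] at hmt
    · have hm := ih m' M' p q hmt hMt
      dsimp only at h1 h2
      split_ifs at h1 h2 <;> simp at h1 h2 <;> obtain ⟨rfl, -⟩ := h1 <;> obtain ⟨rfl, -⟩ := h2 <;> omega

lemma fmin_snoc (p : List Int) : ∀ (x m : Int) (i : Nat), fmin p = some (m, i) →
    fmin (p ++ [x]) = if x < m then some (x, p.length) else some (m, i) := by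
  induction p with
  | nil => intro x m i h; simp [fmin] at h
  | cons y t ih =>
    intro x m i h
    simp only [fmin] at h
    rcases hmt : fmin t with _ | ⟨m', j⟩ <;> rw [hmt] at h
    · -- fmin t = none → t = [] (fmin is none only on [])
      have ht : t = [] := by
        cases t with
        | nil => rfl
        | cons z t' => obtain ⟨a, b, hc⟩ := fmin_cons_some z t'; rw [hc] at hmt; cases hmt
      subst ht
      simp at h
      obtain ⟨rfl, rfl⟩ := h
      show fmin [y, x] = _
      simp only [fmin]
      split_ifs <;> simp <;> omega
    · dsimp only at h
      have hsnoc := ih x m' j hmt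
      have hstep : fmin ((y :: t) ++ [x]) =
          match fmin (t ++ [x]) with
          | none => some (y, 0)
          | some (m'', j'') => if m'' < y then some (m'', j'' + 1) else some (y, 0) := rfl
      rw [hstep, hsnoc]
      split_ifs at h with h1 <;> simp at h <;> obtain ⟨rfl, rfl⟩ := h <;>
        (try dsimp only) <;> split_ifs <;>
        (try simp only [List.length_cons, Option.some.injEq, Prod.mk.injEq]) <;>
        (try split_ifs) <;>
        (try simp only [List.length_cons, Option.some.injEq, Prod.mk.injEq]) <;>
        first | rfl | omega

lemma fmax_snoc (p : List Int) : ∀ (x M : Int) (j : Nat), fmax p = some (M, j) →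
    fmax (p ++ [x]) = if M < x then some (x, p.length) else some (M, j) := by
  induction p with
  | nil => intro x M j h; simp [fmax] at h
  | cons y t ih =>
    intro x M j h
    simp only [fmax] at h
    rcases hMt : fmax t with _ | ⟨M', q⟩ <;> rw [hMt] at h
    · have ht : t = [] := by
        cases t with
        | nil => rfl
        | cons z t' => obtain ⟨a, b, hc⟩ := fmax_cons_some z t'; rw [hc] at hMt; cases hMt
      subst ht
      simp at h
      obtain ⟨rfl, rfl⟩ := h
      show fmax [y, x] = _
      simp only [fmax]
      split_ifs <;> simp <;> omega
    · dsimp only at h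
      have hsnoc := ih x M' q hMt
      have hstep : fmax ((y :: t) ++ [x]) =
          match fmax (t ++ [x]) with
          | none => some (y, 0)
          | some (M'', q'') => if y < M'' then some (M'', q'' + 1) else some (y, 0) := rfl
      rw [hstep, hsnoc]
      split_ifs at h with h1 <;> simp at h <;> obtain ⟨rfl, rfl⟩ := h <;>
        (try dsimp only) <;> split_ifs <;>
        (try simp only [List.length_cons, Option.some.injEq, Prod.mk.injEq]) <;>
        (try split_ifs) <;>
        (try simp only [List.length_cons, Option.some.injEq, Prod.mk.injEq]) <;>
        first | rfl | omega

-- segment algebra, for a ≤ b < p.length, ins := (p.drop a).take (b+1-a)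
lemma seg_len (p : List Int) (a b : Nat) (hab : a ≤ b) (hb : b < p.length) :
    ((p.drop a).take (b + 1 - a)).length = b + 1 - a := by
  simp [List.length_take, List.length_drop]; omega

lemma seg_all (p : List Int) (a b : Nat) (hab : a ≤ b) (hb : b < p.length) :
    (p.drop a).take (b + 1 - a) ++ p.drop (b + 1) = p.drop a := by
  have h1 : p.drop (b + 1) = (p.drop a).drop (b + 1 - a) := by
    rw [List.drop_drop]; congr 1; omega
  rw [h1, List.take_append_drop]

lemma seg_pre (p : List Int) (a b : Nat) (hab : a ≤ b) (hb : b < p.length) :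
    p.take a ++ ((p.drop a).take (b + 1 - a)).dropLast = p.take b := by
  rw [List.dropLast_eq_take, seg_len p a b hab hb]
  have h1 : b + 1 - a - 1 = b - a := by omega
  rw [h1, List.take_take]
  have h2 : min (b - a) (b + 1 - a) = b - a := by omega
  rw [h2]
  have h3 : b = a + (b - a) := by omega
  rw [h3, List.take_add]
  congr 2
  omega

lemma seg_last (p : List Int) (a b : Nat) (hab : a ≤ b) (hb : b < p.length) :
    ((p.drop a).take (b + 1 - a)).drop (((p.drop a).take (b + 1 - a)).length - 1) ++ p.drop (b + 1) = p.drop b := by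
  rw [seg_len p a b hab hb]
  have h1 : b + 1 - a - 1 = b - a := by omega
  rw [h1, List.drop_take]
  have h2 : b + 1 - a - (b - a) = 1 := by omega
  rw [List.drop_drop]
  have h3 : a + (b - a) = b := by omega
  rw [h2, h3]
  have h4 : p.drop (b + 1) = (p.drop b).drop 1 := by rw [List.drop_drop]
  rw [h4, List.take_append_drop]

-- closed form of B's state after processing q
def specSt (q : List Int) : List Int × List Int × List Int × Option (Int × Int) × Bool :=
  match fmin q, fmax q with
  | some (m, i), some (M, j) =>
    (q.take (min i j), (q.drop (min i j)).take (max i j + 1 - min i j), q.drop (max i j + 1),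
     some (m, M), decide (j < i))
  | _, _ => ([], [], [], none, false)

lemma altLoop_cons_some (x : Int) (rest pre ins post : List Int) (mn mx : Int) (bad : Bool) :
    altLoop (x :: rest) pre ins post (some (mn, mx)) bad =
      if x < mn then
        altLoop rest (if bad then pre else pre ++ PySem.List.slice ins none (some (-1)))
          ((if bad then ins else PySem.List.slice ins (some (-1)) none) ++ post ++ [x]) []
          (some (x, mx)) true
      else if x > mx then
        altLoop rest (if bad then pre ++ PySem.List.slice ins none (some (-1)) else pre)
          ((if bad then PySem.List.slice ins (some (-1)) none else ins) ++ post ++ [x]) []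
          (some (mn, x)) false
      else altLoop rest pre ins (post ++ [x]) (some (mn, mx)) bad := by
  cases bad <;> simp only [altLoop] <;> split_ifs <;> rfl

lemma slice_last_of_ne_nil {ins : List Int} :
    PySem.List.slice ins (some (-1)) none = ins.drop (ins.length - 1) :=
  PySem.List.slice_from_neg_one ..

lemma specSt_step (p : List Int) (x : Int) (rest : List Int) :
    altLoop (x :: rest) (specSt p).1 (specSt p).2.1 (specSt p).2.2.1 (specSt p).2.2.2.1 (specSt p).2.2.2.2
    = altLoop rest (specSt (p ++ [x])).1 (specSt (p ++ [x])).2.1 (specSt (p ++ [x])).2.2.1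
        (specSt (p ++ [x])).2.2.2.1 (specSt (p ++ [x])).2.2.2.2 := by
  cases p with
  | nil =>
    show altLoop (x :: rest) [] [] [] none false = _
    have h1 : specSt [x] = ([], [x], [], some (x, x), false) := by
      simp [specSt, fmin, fmax]
    simp only [List.nil_append, h1, altLoop]
  | cons y t =>
    obtain ⟨m, i, hmin⟩ := fmin_cons_some y t
    obtain ⟨M, j, hmax⟩ := fmax_cons_some y t
    set p := y :: t with hp
    have hiL : i < p.length := fmin_lt_length p m i hmin
    have hjL : j < p.length := fmax_lt_length p M j hmax
    have hmM : m ≤ M := fmin_le_fmax p m M i j hmin hmax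
    have hs : specSt p =
        (p.take (min i j), (p.drop (min i j)).take (max i j + 1 - min i j), p.drop (max i j + 1),
         some (m, M), decide (j < i)) := by
      simp [specSt, hmin, hmax]
    rw [hs]
    dsimp only
    rw [altLoop_cons_some]
    by_cases hxm : x < m
    · -- new minimum at the end; ¬ M < x since x < m ≤ M
      have hxM : ¬ (x > M) := by omega
      have hmin' : fmin (p ++ [x]) = some (x, p.length) := by
        rw [fmin_snoc p x m i hmin, if_pos hxm]
      have hmax' : fmax (p ++ [x]) = some (M, j) := by
        rw [fmax_snoc p x M j hmax, if_neg (by omega)]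
      have hs' : specSt (p ++ [x]) =
          ((p ++ [x]).take (min p.length j), ((p ++ [x]).drop (min p.length j)).take (max p.length j + 1 - min p.length j),
           (p ++ [x]).drop (max p.length j + 1), some (x, M), decide (j < p.length)) := by
        simp [specSt, hmin', hmax']
      rw [hs']
      have hminn : min p.length j = j := by omega
      have hmaxn : max p.length j = p.length := by omega
      rw [hminn, hmaxn]
      have hpre : (p ++ [x]).take j = p.take j := List.take_append_of_le_length (by omega)
      have hins : ((p ++ [x]).drop j).take (p.length + 1 - j) = p.drop j ++ [x] := by
        rw [List.drop_append_of_le_length (by omega)]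
        apply List.take_of_length_le
        simp [List.length_drop]; omega
      have hpost : (p ++ [x]).drop (p.length + 1) = [] := by
        apply List.drop_eq_nil_of_le; simp
      rw [hpre, hins, hpost]
      have hdj : decide (j < p.length) = true := decide_eq_true (by omega)
      rw [hdj]
      rw [if_pos hxm]
      by_cases hji : j < i
      · -- already bad: min i j = j, max i j = i
        have e1 : min i j = j := by omega
        have e2 : max i j = i := by omega
        simp only [e1, e2, decide_eq_true hji, if_pos]
        congr 1
        first
          | rw [seg_all p j i (by omega) hiL]
          | rw [← List.append_assoc, seg_all p j i (by omega) hiL]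
      · -- was ok: i ≤ j; pop the max element off inside
        have e1 : min i j = i := by omega
        have e2 : max i j = j := by omega
        have hb : decide (j < i) = false := by simp; omega
        simp only [e1, e2, hb, if_neg, Bool.false_eq_true, not_false_iff]
        rw [PySem.List.slice_to_neg_one, slice_last_of_ne_nil]
        congr 1
        · exact seg_pre p i j (by omega) hjL
        · first
            | rw [seg_last p i j (by omega) hjL]
            | rw [← List.append_assoc, seg_last p i j (by omega) hjL]
    · by_cases hxM : x > M
      · -- new maximum at the end
        have hmin' : fmin (p ++ [x]) = some (m, i) := by
          rw [fmin_snoc p x m i hmin, if_neg hxm]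
        have hmax' : fmax (p ++ [x]) = some (x, p.length) := by
          rw [fmax_snoc p x M j hmax, if_pos (by omega)]
        have hs' : specSt (p ++ [x]) =
            ((p ++ [x]).take (min i p.length), ((p ++ [x]).drop (min i p.length)).take (max i p.length + 1 - min i p.length),
             (p ++ [x]).drop (max i p.length + 1), some (m, x), decide (p.length < i)) := by
          simp [specSt, hmin', hmax']
        rw [hs']
        have hminn : min i p.length = i := by omega
        have hmaxn : max i p.length = p.length := by omega
        rw [hminn, hmaxn]
        have hpre : (p ++ [x]).take i = p.take i := List.take_append_of_le_length (by omega)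
        have hins : ((p ++ [x]).drop i).take (p.length + 1 - i) = p.drop i ++ [x] := by
          rw [List.drop_append_of_le_length (by omega)]
          apply List.take_of_length_le
          simp [List.length_drop]; omega
        have hpost : (p ++ [x]).drop (p.length + 1) = [] := by
          apply List.drop_eq_nil_of_le; simp
        rw [hpre, hins, hpost]
        rw [if_neg hxm, if_pos hxM]
        have hb' : decide (p.length < i) = false := by simp; omega
        rw [hb']
        by_cases hji : j < i
        · -- was bad: min i j = j, max i j = i; pop the min element off inside
          have e1 : min i j = j := by omega
          have e2 : max i j = i := by omega
          simp only [e1, e2, decide_eq_true hji, if_pos]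
          rw [PySem.List.slice_to_neg_one, slice_last_of_ne_nil]
          congr 1
          · exact seg_pre p j i (by omega) hiL
          · first
              | rw [seg_last p j i (by omega) hiL]
              | rw [← List.append_assoc, seg_last p j i (by omega) hiL]
        · have e1 : min i j = i := by omega
          have e2 : max i j = j := by omega
          have hb : decide (j < i) = false := by simp; omega
          simp only [e1, e2, hb, Bool.false_eq_true, if_neg, not_false_iff]
          congr 1
          first
            | rw [seg_all p i j (by omega) hjL]
            | rw [← List.append_assoc, seg_all p i j (by omega) hjL]
      · -- neither a new min nor a new max
        have hmin' : fmin (p ++ [x]) = some (m, i) := by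
          rw [fmin_snoc p x m i hmin, if_neg hxm]
        have hmax' : fmax (p ++ [x]) = some (M, j) := by
          rw [fmax_snoc p x M j hmax, if_neg (by omega)]
        have hs' : specSt (p ++ [x]) =
            ((p ++ [x]).take (min i j), ((p ++ [x]).drop (min i j)).take (max i j + 1 - min i j),
             (p ++ [x]).drop (max i j + 1), some (m, M), decide (j < i)) := by
          simp [specSt, hmin', hmax']
        rw [hs']
        rw [if_neg hxm, if_neg hxM]
        have hpre : (p ++ [x]).take (min i j) = p.take (min i j) :=
          List.take_append_of_le_length (by omega)
        have hins : ((p ++ [x]).drop (min i j)).take (max i j + 1 - min i j)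
            = (p.drop (min i j)).take (max i j + 1 - min i j) := by
          rw [List.drop_append_of_le_length (by omega)]
          exact List.take_append_of_le_length (by simp [List.length_drop]; omega)
        have hpost : (p ++ [x]).drop (max i j + 1) = p.drop (max i j + 1) ++ [x] :=
          List.drop_append_of_le_length (by omega)
        rw [hpre, hins, hpost]

lemma altLoop_spec (rest : List Int) : ∀ (p : List Int),
    altLoop rest (specSt p).1 (specSt p).2.1 (specSt p).2.2.1 (specSt p).2.2.2.1 (specSt p).2.2.2.2
    = specSt (p ++ rest) := by
  induction rest with
  | nil =>
    intro p
    show ((specSt p).1, (specSt p).2.1, (specSt p).2.2.1, (specSt p).2.2.2.1, (specSt p).2.2.2.2) = specSt (p ++ [])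
    simp
  | cons x rest' ih =>
    intro p
    rw [specSt_step p x rest', ih (p ++ [x]), List.append_assoc]
    rfl

-- ===== VERDICT (by name: the statement is the Claim_ definition above) =====
theorem take_around_spec : Claim_equal_take_around := by
  intro iterable _
  unfold Spec_take_around
  cases iterable with
  | nil => rfl
  | cons y t =>
    set p := y :: t with hp
    obtain ⟨m, i, hmin⟩ := fmin_cons_some y t
    obtain ⟨M, j, hmax⟩ := fmax_cons_some y t
    have hiL : i < p.length := fmin_lt_length p m i hmin
    have hjL : j < p.length := fmax_lt_length p M j hmax
    have hA : takeAroundLoop1 p 0 none 0 none 0 = ((some m, i), (some M, j)) := by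
      rw [loop1_cons, hmin, hmax]
    have hB : altLoop p [] [] [] none false = specSt p := by
      have h0 : specSt [] = ([], [], [], none, false) := by simp [specSt, fmin]
      have := altLoop_spec p []
      rw [h0] at this
      simpa using this
    have hs : specSt p =
        (p.take (min i j), (p.drop (min i j)).take (max i j + 1 - min i j), p.drop (max i j + 1),
         some (m, M), decide (j < i)) := by
      simp [specSt, hp, hmin, hmax]
    show take_around p = take_around_alt p
    unfold take_around take_around_alt
    rw [hA, hB, hs]
    dsimp only
    by_cases hji : j < i
    · rw [if_pos hji]
      simp [hji]
    · rw [if_neg hji]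
      have hb : decide (j < i) = false := by simp; omega
      rw [hb]
      simp only [Bool.false_eq_true, if_neg, not_false_iff]
      rw [loop2_low p 0 i j (by omega) (by omega)]
      have e1 : min i j = i := by omega
      have e2 : max i j = j := by omega
      rw [e1, e2]
      simp
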